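-- pv_equiv track=rewrite | github.com/addiskers/GII- | mnm/data2.py | get_sibling_count
-- ===== SOURCE A (Python) =====
-- def get_sibling_count(heading, headings):
--     parts = heading.split('.')
--     base = '.'.join(parts[:-1]) if len(parts) > 1 else ''
--     count = 0
--     for i in range(1, 100):
--         sibling = base + '.' + str(i) if base else str(i)
--         if sibling in headings:
--             count += 1
--         if count >= 2:
--             return count
--     return count
-- ===== SOURCE B (Python) =====
-- def get_sibling_count(heading, headings):
--     parts = heading.split('.')
--     base = '.'.join(parts[:-1]) if len(parts) > 1 else ''
--     # build the 99 possible sibling names once, then scan the distinct headings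
--     siblings = {base + '.' + str(i) if base else str(i) for i in range(1, 100)}
--     count = 0
--     for h in set(headings):
--         if h in siblings:
--             count += 1
--             if count == 2:
--                 break
--     return count
-- ===== Notes on version B (the rewrite author's own statement) =====
-- stated objective: alternative
-- what changed: Instead of probing the 99 candidate names 1..99 each with a membership scan of the headings list, B builds the set of 99 sibling names once and makes a single pass over the distinct headings with set lookups, stopping at 2; measured runtime is comparable (hashing cost offsets the removed scans).
import Mathlib
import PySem

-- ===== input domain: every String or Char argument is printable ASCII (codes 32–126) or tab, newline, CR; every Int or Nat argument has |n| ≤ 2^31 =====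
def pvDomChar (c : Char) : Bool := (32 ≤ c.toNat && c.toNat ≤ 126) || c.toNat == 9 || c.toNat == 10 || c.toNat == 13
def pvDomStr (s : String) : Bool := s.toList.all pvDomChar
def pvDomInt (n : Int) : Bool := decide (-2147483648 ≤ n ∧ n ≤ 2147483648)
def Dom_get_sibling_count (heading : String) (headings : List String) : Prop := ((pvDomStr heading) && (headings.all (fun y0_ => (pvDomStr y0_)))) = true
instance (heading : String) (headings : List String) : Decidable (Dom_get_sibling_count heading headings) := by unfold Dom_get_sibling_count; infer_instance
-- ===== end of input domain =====

-- B replaces A's 99 membership probes against the headings list by one set of the 99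
-- sibling names and a single pass over the distinct headings (early exit at 2).

-- ===== PORT A =====
-- for i in range(1, 100): sibling = …; if sibling in headings: count += 1; if count >= 2: return count
def pvSiblingLoopA (base : String) (headings : List String) : List Int → Int → Int
  | [], count => count
  | i :: rest, count =>
    let sibling := if base ≠ "" then base ++ "." ++ PySem.Int.toStr i else PySem.Int.toStr i
    let count' := if headings.contains sibling then count + 1 else count
    if 2 ≤ count' then count' else pvSiblingLoopA base headings rest count'

def get_sibling_count (heading : String) (headings : List String) : Int :=
  let parts := (PySem.Str.split? heading ".").getD []  -- sep "." ≠ "", so split? is `some` here (exact)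
  let base := if 1 < parts.length then PySem.Str.join "." (PySem.List.slice parts none (some (-1))) else ""
  pvSiblingLoopA base headings (PySem.List.pyRange 1 100 1) 0

-- ===== PORT B =====
-- for h in set(headings): if h in siblings: count += 1; if count == 2: break — then return count
def pvCountCapB (siblings : List String) : List String → Int → Int
  | [], count => count
  | h :: rest, count =>
    if siblings.contains h then
      if count + 1 = 2 then count + 1 else pvCountCapB siblings rest (count + 1)
    else pvCountCapB siblings rest count

def get_sibling_count_alt (heading : String) (headings : List String) : Int :=
  let parts := (PySem.Str.split? heading ".").getD []  -- sep "." ≠ "", so split? is `some` here (exact)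
  let base := if 1 < parts.length then PySem.Str.join "." (PySem.List.slice parts none (some (-1))) else ""
  let siblings := PySem.Set.ofList ((PySem.List.pyRange 1 100 1).map
    (fun i => if base ≠ "" then base ++ "." ++ PySem.Int.toStr i else PySem.Int.toStr i))
  pvCountCapB siblings (PySem.Set.ofList headings) 0

-- ===== PRECONDITION & SPEC =====
def Spec_get_sibling_count (heading : String) (headings : List String) (out : Int) : Prop := out = get_sibling_count_alt heading headings
instance (heading : String) (headings : List String) (out : Int) : Decidable (Spec_get_sibling_count heading headings out) := by unfold Spec_get_sibling_count; infer_instance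

-- ===== CLAIM (what is proved, stated in full; the proofs are below) =====
def Claim_equal_get_sibling_count : Prop := ∀ (heading : String) (headings : List String), Dom_get_sibling_count heading headings → Spec_get_sibling_count heading headings (get_sibling_count heading headings)

-- ===== LEMMAS AND PROOFS =====

-- A's loop computes the number of matching candidates, capped at 2
theorem pvLoopA_eq (base : String) (hs : List String) (l : List Int) (c : Int)
    (h0 : 0 ≤ c) (h1 : c ≤ 1) :
    pvSiblingLoopA base hs l c =
      min 2 (c + (l.countP (fun i =>
        hs.contains (if base ≠ "" then base ++ "." ++ PySem.Int.toStr i else PySem.Int.toStr i)))) := by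
  induction l generalizing c with
  | nil => simp [pvSiblingLoopA]; omega
  | cons i rest ih =>
    simp only [pvSiblingLoopA, List.countP_cons]
    by_cases hm : hs.contains (if base ≠ "" then base ++ "." ++ PySem.Int.toStr i else PySem.Int.toStr i) = true
    · rw [if_pos hm]
      by_cases h2 : (2:Int) ≤ c + 1
      · have hc : c = 1 := by omega
        subst hc
        have : (0:Int) ≤ (rest.countP (fun i =>
          hs.contains (if base ≠ "" then base ++ "." ++ PySem.Int.toStr i else PySem.Int.toStr i)) : Int) := by positivity
        rw [if_pos h2, if_pos hm]
        omega
      · rw [if_neg h2, if_pos hm, ih (c + 1) (by omega) (by omega)]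
        push_cast
        omega
    · rw [if_neg hm]
      have h2 : ¬ (2:Int) ≤ c := by omega
      rw [if_neg h2, if_neg hm, ih c h0 h1]
      push_cast
      omega

-- B's loop computes the number of headings in the sibling set, capped at 2
theorem pvLoopB_eq (sibs : List String) (l : List String) (c : Int)
    (h0 : 0 ≤ c) (h1 : c ≤ 1) :
    pvCountCapB sibs l c = min 2 (c + (l.countP (fun h => sibs.contains h))) := by
  induction l generalizing c with
  | nil => simp [pvCountCapB]; omega
  | cons h rest ih =>
    simp only [pvCountCapB, List.countP_cons]
    by_cases hm : sibs.contains h = true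
    · rw [if_pos hm]
      by_cases h2 : c + 1 = (2:Int)
      · have hc : c = 1 := by omega
        subst hc
        have : (0:Int) ≤ (rest.countP (fun h => sibs.contains h) : Int) := by positivity
        rw [if_pos h2, if_pos hm]
        omega
      · rw [if_neg h2, if_pos hm, ih (c + 1) (by omega) (by omega)]
        push_cast
        omega
    · rw [if_neg hm, if_neg hm, ih c h0 h1]
      push_cast
      omega

-- countP of a disjunction of pointwise-disjoint predicates splits
theorem countP_or_disjoint {α : Type} (l : List α) (p q : α → Bool)
    (hd : ∀ x ∈ l, ¬(p x = true ∧ q x = true)) :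
    l.countP (fun x => p x || q x) = l.countP p + l.countP q := by
  induction l with
  | nil => simp
  | cons a l ih =>
    simp only [List.countP_cons]
    rw [ih (fun x hx => hd x (List.mem_cons_of_mem a hx))]
    by_cases hp : p a
    · have hq : q a = false := by
        have := hd a (List.mem_cons_self)
        simp [hp] at this; simp [this]
      simp [hp, hq]; omega
    · simp only [Bool.not_eq_true] at hp
      simp [hp]; omega

-- the central exchange: counting distinct data elements that hit the candidate image
-- equals counting candidates whose image hits the data
theorem countP_mem_map_eq (f : Int → String) (r : List Int) (hs l : List String)
    (hl : l.Nodup) (hmem : ∀ a, a ∈ l ↔ a ∈ hs) (hr : (r.map f).Nodup) :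
    l.countP (fun a => (r.map f).contains a) = r.countP (fun i => hs.contains (f i)) := by
  induction r with
  | nil => simp
  | cons i r ih =>
    simp only [List.map_cons] at hr
    have hnotin : f i ∉ r.map f := by
      intro hmm; exact (List.nodup_cons.mp hr).1 hmm
    have hr' : (r.map f).Nodup := (List.nodup_cons.mp hr).2
    simp only [List.map_cons, List.countP_cons]
    have hsplit : l.countP (fun a => (f i :: r.map f).contains a) =
        l.countP (fun a => a == f i) + l.countP (fun a => (r.map f).contains a) := by
      rw [List.countP_congr (q := fun a => ((a == f i) || (r.map f).contains a))
        (fun a _ => by simp [List.mem_cons])]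
      apply countP_or_disjoint
      intro x _ ⟨hx1, hx2⟩
      rw [beq_iff_eq] at hx1
      rw [List.contains_iff_mem] at hx2
      exact hnotin (hx1 ▸ hx2)
    rw [hsplit, ih hr']
    have hcount : l.countP (fun a => a == f i) = if hs.contains (f i) then 1 else 0 := by
      rw [show l.countP (fun a => a == f i) = l.count (f i) from rfl]
      by_cases hin : f i ∈ hs
      · rw [if_pos (List.contains_iff_mem.mpr hin)]
        exact List.count_eq_one_of_mem hl ((hmem (f i)).mpr hin)
      · rw [if_neg (fun hc => hin (List.contains_iff_mem.mp hc))]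
        exact List.count_eq_zero_of_not_mem (fun hc => hin ((hmem (f i)).mp hc))
    rw [hcount]
    split_ifs <;> omega

-- the 99 decimal strings "1" … "99" are pairwise distinct
theorem nodup_toStr_range : ((PySem.List.pyRange 1 100 1).map PySem.Int.toStr).Nodup := by decide

-- hence the 99 sibling names are pairwise distinct, for every base
theorem nodup_siblings (base : String) :
    ((PySem.List.pyRange 1 100 1).map
      (fun i => if base ≠ "" then base ++ "." ++ PySem.Int.toStr i else PySem.Int.toStr i)).Nodup := by
  by_cases hb : base = ""
  · simpa [hb] using nodup_toStr_range
  · have : ((PySem.List.pyRange 1 100 1).map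
        (fun i => if base ≠ "" then base ++ "." ++ PySem.Int.toStr i else PySem.Int.toStr i)) =
        ((PySem.List.pyRange 1 100 1).map PySem.Int.toStr).map (fun s => base ++ "." ++ s) := by
      simp [hb, List.map_map, Function.comp]
    rw [this]
    refine List.Nodup.map ?_ nodup_toStr_range
    intro x y hxy
    have hxy' : base ++ "." ++ x = base ++ "." ++ y := hxy
    rwa [String.append_assoc, String.append_assoc, String.append_right_inj,
      String.append_right_inj] at hxy'

-- ===== VERDICT (by name: the statement is the Claim_ definition above) =====
set_option maxRecDepth 4096 in
theorem get_sibling_count_spec : Claim_equal_get_sibling_count := by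
  intro heading headings _
  unfold Spec_get_sibling_count get_sibling_count get_sibling_count_alt
  simp only []
  set parts := (PySem.Str.split? heading ".").getD [] with hparts
  set base := if 1 < parts.length then PySem.Str.join "." (PySem.List.slice parts none (some (-1))) else "" with hbase
  rw [pvLoopA_eq base headings _ 0 le_rfl (by omega),
      pvLoopB_eq _ _ 0 le_rfl (by omega)]
  have key : (PySem.Set.ofList headings).countP (fun h =>
      List.contains (PySem.Set.ofList ((PySem.List.pyRange 1 100 1).map
        (fun i => if base ≠ "" then base ++ "." ++ PySem.Int.toStr i else PySem.Int.toStr i))) h) =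
      (PySem.List.pyRange 1 100 1).countP (fun i =>
        headings.contains (if base ≠ "" then base ++ "." ++ PySem.Int.toStr i else PySem.Int.toStr i)) := by
    rw [List.countP_congr (q := fun h => (((PySem.List.pyRange 1 100 1).map
        (fun i => if base ≠ "" then base ++ "." ++ PySem.Int.toStr i else PySem.Int.toStr i)).contains h))
      (fun a _ => by simp [PySem.Set.mem_ofList])]
    exact countP_mem_map_eq _ _ headings (PySem.Set.ofList headings)
      (PySem.Set.nodup_ofList headings) (fun a => PySem.Set.mem_ofList headings a)
      (nodup_siblings base)
  rw [key]
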